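-- pv_equiv track=rewrite | github.com/bonlaw859/python_projects | dna.py | extract_codons
-- ===== SOURCE A (Python) =====
-- NUC_P_CODON = 3
--
-- def extract_codons(sequence):
--
--     #uppercase the sequence
--     sequence = sequence.upper()
--     #set empty list
--     codons = []
--     #set empty string
--     current_codon = ""
--
--     #loop to skip over junk
--     for char in sequence:
--         #if not junk, add char to current string
--         if char != "-":
--             current_codon += char
--             #once string reaches the nucleotide per codon constant,
--             #add to list and reset string
--             if len(current_codon) == NUC_P_CODON:
--                 codons.append(current_codon)
--                 current_codon = ""
--     #return list
--     return codons
-- ===== SOURCE B (Python) =====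
-- def extract_codons(sequence):
--     # filter-then-chunk: clean the sequence once, then read it off in 3-char slices
--     cleaned = [c for c in sequence.upper() if c != "-"]
--     codons = []
--     i = 0
--     while i + 3 <= len(cleaned):
--         codons.append("".join(cleaned[i:i+3]))
--         i += 3
--     return codons
-- ===== Notes on version B (the rewrite author's own statement) =====
-- stated objective: simpler
-- what changed: Replaces A's accumulate-and-reset character buffer with a filter-then-chunk decomposition: build the cleaned uppercase character list in one comprehension, then peel off length-3 codons by slicing, dropping the incomplete tail.
import Mathlib
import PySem

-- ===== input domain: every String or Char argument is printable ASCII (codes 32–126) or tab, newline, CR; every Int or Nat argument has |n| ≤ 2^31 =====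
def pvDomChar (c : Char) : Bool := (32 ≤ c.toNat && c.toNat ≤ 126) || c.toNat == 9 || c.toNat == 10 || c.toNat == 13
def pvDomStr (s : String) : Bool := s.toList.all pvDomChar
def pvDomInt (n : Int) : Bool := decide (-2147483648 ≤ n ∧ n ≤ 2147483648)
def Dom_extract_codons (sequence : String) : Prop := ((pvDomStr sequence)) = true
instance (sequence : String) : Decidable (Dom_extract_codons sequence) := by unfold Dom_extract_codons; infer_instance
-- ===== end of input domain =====

-- B changes the decomposition only (filter once, then chunk into threes); same values, same cost.

-- ===== PORT A =====
-- A's loop over the uppercased sequence: skip '-', grow the current codon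
-- (kept as List Char: Python string concatenation), flush at length 3.
def pvStepA (st : List String × List Char) (ch : Char) : List String × List Char :=
  if ch ≠ '-' then
    let cur := st.2 ++ [ch]
    if cur.length = 3 then (st.1 ++ [String.ofList cur], []) else (st.1, cur)
  else st

def extract_codons (sequence : String) : List String :=
  ((PySem.Str.upper sequence).toList.foldl pvStepA ([], [])).1

-- ===== PORT B =====
-- B's while-loop over an index: cleaned[i:i+3] with 0 ≤ i is exactly
-- (l.drop i).take 3 (PySem.List.slice_toNat clamp semantics).
def pvChunkFrom (l : List Char) (i : Nat) : List String :=
  if i + 3 ≤ l.length then String.ofList ((l.drop i).take 3) :: pvChunkFrom l (i + 3) else []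
termination_by l.length - i
decreasing_by omega

def extract_codons_alt (sequence : String) : List String :=
  pvChunkFrom ((PySem.Str.upper sequence).toList.filter (fun c => c ≠ '-')) 0

-- ===== PRECONDITION & SPEC =====
def Spec_extract_codons (sequence : String) (out : List String) : Prop := out = extract_codons_alt sequence
instance (sequence : String) (out : List String) : Decidable (Spec_extract_codons sequence out) := by unfold Spec_extract_codons; infer_instance

-- ===== CLAIM (what is proved, stated in full; the proofs are below) =====
def Claim_equal_extract_codons : Prop := ∀ (sequence : String), Dom_extract_codons sequence → Spec_extract_codons sequence (extract_codons sequence)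

-- ===== LEMMAS AND PROOFS =====

-- chunking from index i is chunking the remainder of the list
def pvChunk3 (l : List Char) : List String :=
  if 3 ≤ l.length then String.ofList (l.take 3) :: pvChunk3 (l.drop 3) else []
termination_by l.length
decreasing_by simp; omega

lemma pvChunkFrom_eq (l : List Char) (i : Nat) : pvChunkFrom l i = pvChunk3 (l.drop i) := by
  rw [pvChunkFrom, pvChunk3]
  by_cases h : i + 3 ≤ l.length
  · rw [if_pos h, if_pos (by simp; omega), pvChunkFrom_eq l (i + 3), List.drop_drop]
  · rw [if_neg h, if_neg (by simp; omega)]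
termination_by l.length - i
decreasing_by omega

lemma pvChunk3_short {l : List Char} (h : l.length ≤ 2) : pvChunk3 l = [] := by
  rw [pvChunk3]; simp; omega

-- the loop invariant: with a partial codon `cur` (length ≤ 2) in the buffer,
-- A's fold produces the accumulator followed by the codons of `cur ++ filtered input`
lemma pvLoopA (l : List Char) : ∀ (acc : List String) (cur : List Char), cur.length ≤ 2 →
    (l.foldl pvStepA (acc, cur)).1 = acc ++ pvChunk3 (cur ++ l.filter (fun c => c ≠ '-')) := by
  induction l with
  | nil =>
    intro acc cur h
    simp [pvChunk3_short (by simpa using h)]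
  | cons c rest ih =>
    intro acc cur h
    by_cases hc : c = '-'
    · simp [pvStepA, hc, ih acc cur h]
    · by_cases hlen : (cur ++ [c]).length = 3
      · have hrw : pvChunk3 (cur ++ c :: rest.filter (fun c => c ≠ '-'))
            = String.ofList (cur ++ [c]) :: pvChunk3 (rest.filter (fun c => c ≠ '-')) := by
          rw [pvChunk3]
          have h3 : 3 ≤ (cur ++ c :: rest.filter (fun c => c ≠ '-')).length := by
            simp at hlen ⊢; omega
          have htake : (cur ++ c :: rest.filter (fun c => c ≠ '-')).take 3 = cur ++ [c] := by
            have : cur ++ c :: rest.filter (fun c => c ≠ '-')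
                = (cur ++ [c]) ++ rest.filter (fun c => c ≠ '-') := by simp
            rw [this, ← hlen, List.take_left]
          have hdrop : (cur ++ c :: rest.filter (fun c => c ≠ '-')).drop 3
              = rest.filter (fun c => c ≠ '-') := by
            have : cur ++ c :: rest.filter (fun c => c ≠ '-')
                = (cur ++ [c]) ++ rest.filter (fun c => c ≠ '-') := by simp
            rw [this, ← hlen, List.drop_left]
          rw [if_pos h3, htake, hdrop]
        simp only [List.foldl_cons, pvStepA, hc, hlen, if_pos, ne_eq,
          not_false_eq_true]
        rw [ih (acc ++ [String.ofList (cur ++ [c])]) [] (by simp),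
          List.filter_cons_of_pos (by simp [hc]), hrw]
        simp
      · simp only [List.foldl_cons, pvStepA, hc, ne_eq, not_false_eq_true, ite_true, hlen,
          if_neg]
        rw [ih acc (cur ++ [c]) (by simp at hlen ⊢; omega),
          List.filter_cons_of_pos (by simp [hc])]
        simp

-- ===== VERDICT (by name: the statement is the Claim_ definition above) =====
theorem extract_codons_spec : Claim_equal_extract_codons := by
  intro s _
  unfold Spec_extract_codons extract_codons extract_codons_alt
  rw [pvChunkFrom_eq, List.drop_zero]
  simpa using pvLoopA (PySem.Str.upper s).toList [] [] (by simp)
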